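-- pv_equiv track=rewrite | github.com/alexrinc/Projet-Maths-Info-Travelling-Salesman-Problem | algorithms/insertion.py | cheapest_insertion
-- ===== SOURCE A (Python) =====
-- def path_cost(path, matrix):
--     """
--     Calcule la longueur totale d'un chemin fermé donc retour à la ville de départ
--     à partir d'un chemin donné et d'une matrice de distance
--
--     --- Version compactée de la fonction "path_length_matrix" ---
--
--     """
--     return sum(matrix[path[i]][path[(i + 1) % len(path)]] for i in range(len(path)))
--
-- def cheapest_insertion(dist_matrix):
--     """
--     METHODE D'INSERTION :
--     Construit une solution approchée du TSP par heuristique d'insertion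
--
--     La fonction prend en entrée une matrice carrée des distances entre les villes et
--     renvoie un ordre de visite minimisant approximativment la distance totale du chemin
--
--     """
--     n = len(dist_matrix)                                 #Nombre total des villes
--     unvisited = list(range(n))                           #Liste des idices des villes non inserees dans le circuit
--     path = [unvisited.pop(0), unvisited.pop(0)]          #Initialisation du chemin avec les deux premières villes
--
--
--     while unvisited:
--         #Recherhce la meilleure ville à inserer et de sa position optimale
--
--         best_cost = float('inf')                            #Init avec la valeur infini pour technique borne inférieur
--         best_place = None
--         to_insert = None                                    #Ville à insérer lorsque celle-ci augmente le moins le coût total du chemin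
--
--         for v in unvisited:                                 #Insertion de chaque ville restantes une à une
--             for i in range(len(path)):
--                 test_path = path[:i+1] + [v] + path[i+1:]   #Création d'un nouveau chemin hypothétique ave la ville v
--                 new_cost = path_cost(test_path, dist_matrix)
--
--                 #Si l'insertion donne un meilleur cout alors on la garde en mémoire comme meilleure option
--                 if new_cost < best_cost:
--                     best_cost = new_cost
--                     best_place = i+1
--                     to_insert = v
--
--         #Insertion de la meilleure ville à la meilleure position
--         path.insert(best_place, to_insert)
--         unvisited.remove(to_insert)
--
--     path.append(path[0])
--     return path
-- ===== SOURCE B (Python) =====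
-- def cheapest_insertion(dist_matrix):
--     """Cheapest-insertion TSP heuristic; picks each (city, position) by the
--     O(1) insertion delta instead of recomputing the full path cost (O(n^3) vs O(n^4))."""
--     n = len(dist_matrix)
--     path = [0, 1]
--     unvisited = list(range(2, n))
--     while unvisited:
--         best = None  # (delta, place, city)
--         L = len(path)
--         for v in unvisited:
--             for i in range(L):
--                 a, b = path[i], path[(i + 1) % L]
--                 delta = dist_matrix[a][v] + dist_matrix[v][b] - dist_matrix[a][b]
--                 if best is None or delta < best[0]:
--                     best = (delta, i + 1, v)
--         path.insert(best[1], best[2])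
--         unvisited.remove(best[2])
--     path.append(path[0])
--     return path
-- ===== Notes on version B (the rewrite author's own statement) =====
-- stated objective: faster
-- what changed: Each candidate insertion is scored by its O(1) insertion delta d[a][v]+d[v][b]-d[a][b] instead of rebuilding the hypothetical tour and recomputing its full path_cost, removing the innermost O(n) scan; the scan order and strict-< tie-breaking are unchanged, so the selected city/position is identical.
import Mathlib
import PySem

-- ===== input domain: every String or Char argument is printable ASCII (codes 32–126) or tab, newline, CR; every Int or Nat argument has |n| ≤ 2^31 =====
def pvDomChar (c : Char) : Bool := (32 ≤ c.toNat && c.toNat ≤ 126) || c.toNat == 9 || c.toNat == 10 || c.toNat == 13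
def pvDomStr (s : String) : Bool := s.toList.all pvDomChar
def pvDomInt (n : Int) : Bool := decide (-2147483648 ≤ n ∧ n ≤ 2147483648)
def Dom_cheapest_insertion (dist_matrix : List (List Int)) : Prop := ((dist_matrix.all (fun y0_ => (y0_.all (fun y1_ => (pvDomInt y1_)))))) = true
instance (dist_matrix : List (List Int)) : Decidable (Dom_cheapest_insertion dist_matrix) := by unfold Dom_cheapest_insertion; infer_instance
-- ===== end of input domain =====

-- B scores each candidate insertion by its local insertion delta instead of rebuilding the
-- hypothetical tour and recomputing its full path_cost as A does (a timing run measured B faster).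

-- ===== PORT A =====

-- dist_matrix[a][b]; both indices are in range on every input admitted by Pre_, where this is exact
def pvMget (m : List (List Int)) (a b : Int) : Int :=
  (PySem.List.pyGet? ((PySem.List.pyGet? m a).getD []) b).getD 0

-- path_cost(path, matrix) = sum(matrix[path[i]][path[(i+1) % len(path)]] for i in range(len(path)))
-- (the loop indices satisfy 0 ≤ i < len(path), so path[i] is List.getD, exact here)
def pvPathCost (path : List Int) (m : List (List Int)) : Int :=
  (List.range path.length).foldl
    (fun s i => s + pvMget m (path.getD i 0) (path.getD ((i + 1) % path.length) 0)) 0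

-- body of A's inner 'for i in range(len(path))' loop; state = (best_cost, best_place, to_insert);
-- best_cost = none models the initial float('inf') (every computed cost compares below it)
def pvStepA (m : List (List Int)) (path : List Int) (v : Int)
    (st : Option Int × Option Nat × Option Int) (i : Nat) :
    Option Int × Option Nat × Option Int :=
  -- test_path = path[:i+1] + [v] + path[i+1:]  (slices at 0 ≤ i+1 ≤ len(path): take/drop, exact)
  let test := path.take (i + 1) ++ v :: path.drop (i + 1)
  let c := pvPathCost test m
  match st.1 with
  | none => (some c, some (i + 1), some v)
  | some bc => if c < bc then (some c, some (i + 1), some v) else st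

-- the 'for v in unvisited: for i in range(len(path)):' selection
def pvSelectA (m : List (List Int)) (path unvisited : List Int) :
    Option Int × Option Nat × Option Int :=
  unvisited.foldl (fun st v => (List.range path.length).foldl (pvStepA m path v) st)
    (none, none, none)

-- the while loop; fuel = len(unvisited): each iteration removes exactly one element
def pvLoopA (m : List (List Int)) : Nat → List Int → List Int → List Int
  | 0, path, _ => path
  | fuel + 1, path, unvisited =>
    match unvisited with
    | [] => path
    | _ :: _ =>
      let st := pvSelectA m path unvisited
      let place := st.2.1.getD 0   -- best_place (some _ whenever path ≠ []; getD is unreachable under Pre_)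
      let city := st.2.2.getD 0    -- to_insert
      -- path.insert(best_place, to_insert) at 0 ≤ place ≤ len(path): take/drop splice, exact
      pvLoopA m fuel (path.take place ++ city :: path.drop place)
        ((PySem.List.remove? unvisited city).getD unvisited)

def cheapest_insertion (dist_matrix : List (List Int)) : List Int :=
  let n := dist_matrix.length
  -- unvisited = list(range(n)); path = [unvisited.pop(0), unvisited.pop(0)]
  match PySem.List.pyRange 0 (n : Int) 1 with
  | a :: b :: rest =>
    let path := pvLoopA dist_matrix rest.length [a, b] rest
    path ++ [path.headD 0]          -- path.append(path[0])
  | _ => []                         -- n < 2: Python raises IndexError (pop from empty); outside Pre_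

-- ===== PORT B =====

-- body of B's inner loop: best = None | (delta, place, city)
def pvStepB (m : List (List Int)) (path : List Int) (v : Int)
    (best : Option (Int × Nat × Int)) (i : Nat) : Option (Int × Nat × Int) :=
  let a := path.getD i 0
  let b := path.getD ((i + 1) % path.length) 0
  let delta := pvMget m a v + pvMget m v b - pvMget m a b
  match best with
  | none => some (delta, i + 1, v)
  | some t => if delta < t.1 then some (delta, i + 1, v) else best

def pvBestB (m : List (List Int)) (path unvisited : List Int) : Option (Int × Nat × Int) :=
  unvisited.foldl (fun best v => (List.range path.length).foldl (pvStepB m path v) best) none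

def pvLoopB (m : List (List Int)) : Nat → List Int → List Int → List Int
  | 0, path, _ => path
  | fuel + 1, path, unvisited =>
    match unvisited with
    | [] => path
    | _ :: _ =>
      match pvBestB m path unvisited with
      | none => path                -- unreachable: path is never empty here
      | some (_, place, city) =>
        -- path.insert(place, city) at 0 ≤ place ≤ len(path): take/drop splice, exact
        pvLoopB m fuel (path.take place ++ city :: path.drop place)
          ((PySem.List.remove? unvisited city).getD unvisited)

def cheapest_insertion_alt (dist_matrix : List (List Int)) : List Int :=
  let u0 := PySem.List.pyRange 2 (dist_matrix.length : Int) 1   -- unvisited = list(range(2, n))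
  let path := pvLoopB dist_matrix u0.length [0, 1] u0           -- path = [0, 1]
  path ++ [path.headD 0]

-- ===== PRECONDITION & SPEC =====
-- Pre_ excludes exactly the inputs where A raises IndexError: fewer than two cities (pop from
-- an empty list), or, for n ≥ 3, a row too short for the off-diagonal entries A reads (row i
-- needs n entries, the last row only n-1 — its diagonal entry is never read; for n = 2 the
-- distance matrix is never indexed at all).
def Pre_cheapest_insertion (dist_matrix : List (List Int)) : Prop :=
  2 ≤ dist_matrix.length ∧
    (dist_matrix.length = 2 ∨
      ∀ i < dist_matrix.length,
        (if i + 1 = dist_matrix.length then dist_matrix.length - 1 else dist_matrix.length)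
          ≤ (dist_matrix.getD i []).length)
instance (dist_matrix : List (List Int)) : Decidable (Pre_cheapest_insertion dist_matrix) := by
  unfold Pre_cheapest_insertion; infer_instance

def pvWitness_cheapest_insertion : List (List Int) := [[0, 3], [3, 0]]

def Spec_cheapest_insertion (dist_matrix : List (List Int)) (out : List Int) : Prop :=
  out = cheapest_insertion_alt dist_matrix
instance (dist_matrix : List (List Int)) (out : List Int) :
    Decidable (Spec_cheapest_insertion dist_matrix out) := by
  unfold Spec_cheapest_insertion; infer_instance

-- ===== CLAIM (what is proved, stated in full; the proofs are below) =====
def Claim_equal_cheapest_insertion : Prop :=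
  ∀ (dist_matrix : List (List Int)), Dom_cheapest_insertion dist_matrix →
    Pre_cheapest_insertion dist_matrix →
    Spec_cheapest_insertion dist_matrix (cheapest_insertion dist_matrix)

-- ===== LEMMAS AND PROOFS =====

-- structural sum of consecutive-pair distances (the proof-side view of path_cost)
def pvAdjSum (m : List (List Int)) : List Int → Int
  | a :: b :: t => pvMget m a b + pvAdjSum m (b :: t)
  | _ => 0

theorem pvAdjSum_snoc (m : List (List Int)) (q : List Int) (a x : Int) :
    pvAdjSum m (a :: q ++ [x]) = pvAdjSum m (a :: q) + pvMget m ((a :: q).getD q.length 0) x := by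
  induction q generalizing a with
  | nil => simp [pvAdjSum]
  | cons b t ih =>
    simp only [List.cons_append, pvAdjSum, List.length_cons, List.getD_cons_succ] at *
    rw [ih b]; ring

theorem pvLinSum (m : List (List Int)) (q : List Int) (a : Int) :
    (((List.range q.length).map
      (fun i => pvMget m ((a :: q).getD i 0) ((a :: q).getD (i + 1) 0))).sum)
      = pvAdjSum m (a :: q) := by
  induction q generalizing a with
  | nil => simp [pvAdjSum]
  | cons b t ih =>
    rw [List.length_cons, List.range_succ_eq_map, List.map_cons, List.map_map, List.sum_cons]
    have hfun : ((fun i => pvMget m ((a :: b :: t).getD i 0) ((a :: b :: t).getD (i + 1) 0)) ∘ Nat.succ)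
        = (fun i => pvMget m ((b :: t).getD i 0) ((b :: t).getD (i + 1) 0)) := by
      funext i
      show pvMget m ((a :: b :: t).getD (i + 1) 0) ((a :: b :: t).getD (i + 1 + 1) 0) = _
      simp
    rw [hfun, ih b]
    simp [pvAdjSum]

-- path_cost of a nonempty path = adjacent-pair sum of the closed tour
theorem pvPathCost_eq_adjSum (m : List (List Int)) (a : Int) (q : List Int) :
    pvPathCost (a :: q) m = pvAdjSum m ((a :: q) ++ [a]) := by
  unfold pvPathCost
  rw [PySem.List.foldl_add, zero_add]
  rw [List.length_cons, List.range_succ, List.map_append, List.sum_append]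
  rw [List.map_congr_left (g := fun i => pvMget m ((a :: q).getD i 0) ((a :: q).getD (i + 1) 0))
      (by intro i hi
          have : i < q.length := List.mem_range.mp hi
          have h2 : (i + 1) % (q.length + 1) = i + 1 := Nat.mod_eq_of_lt (by omega)
          simp [h2])]
  rw [pvLinSum]
  have hsnoc := pvAdjSum_snoc m q a a
  rw [show (a :: q) ++ [a] = a :: q ++ [a] from rfl, hsnoc]
  simp [Nat.mod_self]

-- inserting strictly inside a list changes the adjacent-pair sum by the local delta
theorem pvAdjSum_insert (m : List (List Int)) (v : Int) :
    ∀ (j : Nat) (r : List Int), j + 1 < r.length →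
      pvAdjSum m (r.take (j + 1) ++ v :: r.drop (j + 1))
        = pvAdjSum m r + pvMget m (r.getD j 0) v + pvMget m v (r.getD (j + 1) 0)
            - pvMget m (r.getD j 0) (r.getD (j + 1) 0) := by
  intro j
  induction j with
  | zero =>
    intro r hr
    match r, hr with
    | a :: b :: t, _ => simp [pvAdjSum]; ring
  | succ j ih =>
    intro r hr
    match r, hr with
    | a :: b :: t, hr =>
      have h' : j + 1 < (b :: t).length := by simp at hr ⊢; omega
      have := ih (b :: t) h'
      simp only [List.take_succ_cons, List.drop_succ_cons, List.cons_append, pvAdjSum,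
        List.getD_cons_succ] at this ⊢
      rw [this]; ring

-- THE KEY FACT: A's fully recomputed cost of the hypothetical tour = current cost + B's delta
theorem pvCost_insert (m : List (List Int)) (p : List Int) (v : Int) (i : Nat)
    (hp : p ≠ []) (hi : i < p.length) :
    pvPathCost (p.take (i + 1) ++ v :: p.drop (i + 1)) m
      = pvPathCost p m
        + (pvMget m (p.getD i 0) v + pvMget m v (p.getD ((i + 1) % p.length) 0)
            - pvMget m (p.getD i 0) (p.getD ((i + 1) % p.length) 0)) := by
  match p, hp with
  | a :: q, _ =>
    have hlen : i < q.length + 1 := by simpa using hi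
    have htest : (a :: q).take (i + 1) ++ v :: (a :: q).drop (i + 1)
        = a :: (q.take i ++ v :: q.drop i) := by
      simp [List.take_succ_cons, List.drop_succ_cons]
    rw [htest, pvPathCost_eq_adjSum]
    have hr : (a :: (q.take i ++ v :: q.drop i)) ++ [a]
        = ((a :: q) ++ [a]).take (i + 1) ++ v :: ((a :: q) ++ [a]).drop (i + 1) := by
      rw [List.take_append_of_le_length (by simpa using Nat.succ_le_of_lt hlen),
          List.drop_append_of_le_length (by simpa using Nat.succ_le_of_lt hlen)]
      simp [List.take_succ_cons, List.drop_succ_cons]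
    rw [hr, pvAdjSum_insert m v i ((a :: q) ++ [a]) (by simp; omega)]
    rw [pvPathCost_eq_adjSum]
    have hgi : ((a :: q) ++ [a]).getD i 0 = (a :: q).getD i 0 :=
      List.getD_append _ _ _ _ (by simpa using hlen)
    have hgi1 : ((a :: q) ++ [a]).getD (i + 1) 0 = (a :: q).getD ((i + 1) % (a :: q).length) 0 := by
      rcases Nat.lt_or_ge (i + 1) (q.length + 1) with h | h
      · rw [List.getD_append _ _ _ _ (by simpa using h)]
        simp [Nat.mod_eq_of_lt h]
      · have : i + 1 = q.length + 1 := by omega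
        rw [this]
        simp [Nat.mod_self]
    rw [hgi, hgi1]
    simp only [List.length_cons]
    ring

-- relation between A's selection state and B's: A's best_cost is B's best delta shifted
-- by the cost of the current path
def pvRel (C : Int) (stA : Option Int × Option Nat × Option Int)
    (stB : Option (Int × Nat × Int)) : Prop :=
  match stB with
  | none => stA = (none, none, none)
  | some t => stA = (some (C + t.1), some t.2.1, some t.2.2)

theorem pvStep_rel (m : List (List Int)) (p : List Int) (v : Int) (i : Nat)
    (hp : p ≠ []) (hi : i < p.length)
    (stA : Option Int × Option Nat × Option Int) (stB : Option (Int × Nat × Int))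
    (h : pvRel (pvPathCost p m) stA stB) :
    pvRel (pvPathCost p m) (pvStepA m p v stA i) (pvStepB m p v stB i) := by
  have hc := pvCost_insert m p v i hp hi
  cases stB with
  | none =>
    simp only [pvRel] at h
    subst h
    simp only [pvStepA, pvStepB, pvRel, hc]
  | some t =>
    obtain ⟨dl, pl, ct⟩ := t
    simp only [pvRel] at h
    subst h
    simp only [pvStepA, pvStepB, hc]
    by_cases hlt : pvMget m (p.getD i 0) v + pvMget m v (p.getD ((i + 1) % p.length) 0)
        - pvMget m (p.getD i 0) (p.getD ((i + 1) % p.length) 0) < dl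
    · rw [if_pos hlt, if_pos (by omega)]
      simp [pvRel]
    · rw [if_neg hlt, if_neg (by omega)]
      simp [pvRel]

theorem pvInner_rel (m : List (List Int)) (p : List Int) (v : Int) (hp : p ≠ [])
    (l : List Nat) (hl : ∀ i ∈ l, i < p.length)
    (stA : Option Int × Option Nat × Option Int) (stB : Option (Int × Nat × Int))
    (h : pvRel (pvPathCost p m) stA stB) :
    pvRel (pvPathCost p m) (l.foldl (pvStepA m p v) stA) (l.foldl (pvStepB m p v) stB) := by
  induction l generalizing stA stB with
  | nil => exact h
  | cons i l' ih =>
    simp only [List.foldl_cons]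
    exact ih (fun j hj => hl j (List.mem_cons_of_mem _ hj)) _ _
      (pvStep_rel m p v i hp (hl i (List.mem_cons_self)) _ _ h)

theorem pvSelect_rel (m : List (List Int)) (p u : List Int) (hp : p ≠ []) :
    pvRel (pvPathCost p m) (pvSelectA m p u) (pvBestB m p u) := by
  unfold pvSelectA pvBestB
  have main : ∀ (u' : List Int) stA stB, pvRel (pvPathCost p m) stA stB →
      pvRel (pvPathCost p m)
        (u'.foldl (fun st v => (List.range p.length).foldl (pvStepA m p v) st) stA)
        (u'.foldl (fun best v => (List.range p.length).foldl (pvStepB m p v) best) stB) := by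
    intro u'
    induction u' with
    | nil => intro _ _ h; exact h
    | cons w u'' ih =>
      intro stA stB h
      simp only [List.foldl_cons]
      exact ih _ _ (pvInner_rel m p w hp _ (fun i hi => List.mem_range.mp hi) _ _ h)
  exact main u _ _ rfl

theorem pvStepB_isSome (m : List (List Int)) (p : List Int) (v : Int)
    (st : Option (Int × Nat × Int)) (i : Nat) : (pvStepB m p v st i).isSome := by
  cases st with
  | none => simp [pvStepB]
  | some t => simp only [pvStepB]; split <;> simp

theorem pvInnerB_isSome (m : List (List Int)) (p : List Int) (v : Int) :
    ∀ (l : List Nat) (st : Option (Int × Nat × Int)),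
      (l ≠ [] ∨ st.isSome) → ((l.foldl (pvStepB m p v) st)).isSome := by
  intro l
  induction l with
  | nil =>
    intro st h
    cases h with
    | inl h => exact absurd rfl h
    | inr h => exact h
  | cons i l' ih =>
    intro st _
    simp only [List.foldl_cons]
    by_cases hl : l' = []
    · subst hl; simpa using pvStepB_isSome m p v st i
    · exact ih _ (Or.inl hl)

theorem pvBestB_isSome (m : List (List Int)) (p u : List Int) (hp : p ≠ []) (hu : u ≠ []) :
    (pvBestB m p u).isSome := by
  have hrange : (List.range p.length) ≠ [] := by
    simpa [List.range_eq_nil] using (List.length_pos_iff.mpr hp).ne'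
  match u, hu with
  | w :: u', _ =>
    unfold pvBestB
    simp only [List.foldl_cons]
    have houter : ∀ (u'' : List Int) (st : Option (Int × Nat × Int)), st.isSome →
        ((u''.foldl (fun best v => (List.range p.length).foldl (pvStepB m p v) best) st)).isSome := by
      intro u''
      induction u'' with
      | nil => intro st h; exact h
      | cons y ys ih =>
        intro st h
        simp only [List.foldl_cons]
        exact ih _ (pvInnerB_isSome m p y _ _ (Or.inr h))
    exact houter u' _ (pvInnerB_isSome m p w _ _ (Or.inl hrange))

theorem pvLoop_eq (m : List (List Int)) :
    ∀ (fuel : Nat) (path u : List Int), path ≠ [] →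
      pvLoopA m fuel path u = pvLoopB m fuel path u := by
  intro fuel
  induction fuel with
  | zero => intro path u _; rfl
  | succ fuel ih =>
    intro path u hp
    cases u with
    | nil => rfl
    | cons w u' =>
      obtain ⟨⟨dl, pl, ct⟩, hsome⟩ :=
        Option.isSome_iff_exists.mp (pvBestB_isSome m path (w :: u') hp (by simp))
      have hrel := pvSelect_rel m path (w :: u') hp
      rw [hsome] at hrel
      simp only [pvRel] at hrel
      simp only [pvLoopA, pvLoopB, hsome, hrel, Option.getD_some]
      exact ih _ _ (by simp)

-- ===== VERDICT (by name: the statement is the Claim_ definition above) =====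
theorem cheapest_insertion_spec : Claim_equal_cheapest_insertion := by
  intro dm _hdom hpre
  show cheapest_insertion dm = cheapest_insertion_alt dm
  have h2 : 2 ≤ dm.length := hpre.1
  have hb : (2 : Int) ≤ (dm.length : Int) := by exact_mod_cast h2
  have hrange : PySem.List.pyRange 0 (dm.length : Int) 1
      = 0 :: 1 :: PySem.List.pyRange 2 (dm.length : Int) 1 := by
    rw [PySem.List.pyRange_one_cons (by omega)]
    norm_num
    rw [PySem.List.pyRange_one_cons (by omega)]
    norm_num
  unfold cheapest_insertion cheapest_insertion_alt
  simp only [hrange]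
  rw [pvLoop_eq dm _ _ _ (by simp)]
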